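-- pv_equiv track=rewrite | github.com/ironiclawdoctor-design/deception-floor-commodity-factory | autoresearch-natewife/eval_adversarial.py | adv_eval6_triage_priority
-- ===== SOURCE A (Python) =====
-- def adv_eval6_triage_priority(responses):
--     """
--     Scenario 6 only: BTC + tokens + crons all failed simultaneously.
--     Pass = token/credits mentioned BEFORE crons/agents.
--     Fail = cron restart mentioned first, or crons only.
--     """
--     r = responses[5].lower()
--     token_pos = -1
--     cron_pos = -1
--     for phrase in ['token', 'credit', 'openrouter', 'haiku', 'famine']:
--         pos = r.find(phrase)
--         if pos != -1:
--             token_pos = pos if token_pos == -1 else min(token_pos, pos)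
--     for phrase in ['cron', 'agent', 'heartbeat', 'pipeline']:
--         pos = r.find(phrase)
--         if pos != -1:
--             cron_pos = pos if cron_pos == -1 else min(cron_pos, pos)
--     if token_pos == -1:
--         return 0  # no token mention at all = fail
--     if cron_pos == -1:
--         return 1  # only token mentioned = ok (token is priority)
--     return 1 if token_pos < cron_pos else 0
-- ===== SOURCE B (Python) =====
-- TOKEN_PHRASES = ('token', 'credit', 'openrouter', 'haiku', 'famine')
-- CRON_PHRASES = ('cron', 'agent', 'heartbeat', 'pipeline')
--
-- def adv_eval6_triage_priority(responses):
--     # Single left-to-right scan: the first position where any phrase starts decides.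
--     # A cron phrase at (or before) the earliest token phrase means fail (ties fail, as in A).
--     r = responses[5].lower()
--     for i in range(len(r)):
--         if any(r.startswith(p, i) for p in CRON_PHRASES):
--             return 0
--         if any(r.startswith(p, i) for p in TOKEN_PHRASES):
--             return 1
--     return 0
-- ===== Notes on version B (the rewrite author's own statement) =====
-- stated objective: alternative
-- what changed: Replaces the two find+min accumulation loops over phrase lists (nine full substring searches) with a single left-to-right scan of the response that stops at the first position where any cron or token phrase starts, deciding immediately.
import Mathlib
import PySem

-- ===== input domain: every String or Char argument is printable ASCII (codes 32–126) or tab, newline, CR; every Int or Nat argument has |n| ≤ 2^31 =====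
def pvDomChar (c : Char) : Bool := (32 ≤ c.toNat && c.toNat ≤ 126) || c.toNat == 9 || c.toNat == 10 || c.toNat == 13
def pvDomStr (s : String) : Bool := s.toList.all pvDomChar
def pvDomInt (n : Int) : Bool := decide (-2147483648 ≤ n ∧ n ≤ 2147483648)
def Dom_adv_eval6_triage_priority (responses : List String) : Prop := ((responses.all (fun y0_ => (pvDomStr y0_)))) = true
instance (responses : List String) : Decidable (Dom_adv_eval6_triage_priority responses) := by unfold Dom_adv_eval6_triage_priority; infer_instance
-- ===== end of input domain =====

-- B replaces A's two find+min loops over phrase lists by one left-to-right scan of the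
-- response that decides at the first position where any phrase starts (objective: alternative).

-- the two phrase lists (shared literals of both programs)
def pvTokPhrases : List String := ["token", "credit", "openrouter", "haiku", "famine"]
def pvCronPhrases : List String := ["cron", "agent", "heartbeat", "pipeline"]

-- ===== PORT A =====
def adv_eval6_triage_priority (responses : List String) : Int :=
  let r := PySem.Str.lower ((PySem.List.pyGet? responses 5).getD "")
  let token_pos : Int := pvTokPhrases.foldl
    (fun acc phrase =>
      let pos := PySem.Str.find r phrase
      if pos ≠ -1 then (if acc = -1 then pos else min acc pos) else acc) (-1)
  let cron_pos : Int := pvCronPhrases.foldl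
    (fun acc phrase =>
      let pos := PySem.Str.find r phrase
      if pos ≠ -1 then (if acc = -1 then pos else min acc pos) else acc) (-1)
  if token_pos = -1 then 0
  else if cron_pos = -1 then 1
  else if token_pos < cron_pos then 1 else 0

-- ===== PORT B =====
-- the 'for i in range(len(r))' scan: the suffix at index i is the list tail
def pvScanGo : List Char → Int
  | [] => 0
  | c :: rest =>
    if pvCronPhrases.any (fun p => PySem.Chars.startswith (c :: rest) p.toList) then 0
    else if pvTokPhrases.any (fun p => PySem.Chars.startswith (c :: rest) p.toList) then 1
    else pvScanGo rest

def adv_eval6_triage_priority_alt (responses : List String) : Int :=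
  pvScanGo (PySem.Chars.lower ((PySem.List.pyGet? responses 5).getD "").toList)

-- ===== PRECONDITION & SPEC =====
-- A indexes responses[5]: lists of length < 6 raise IndexError and are excluded.
def Pre_adv_eval6_triage_priority (responses : List String) : Prop := 6 ≤ responses.length
instance (responses : List String) : Decidable (Pre_adv_eval6_triage_priority responses) := by unfold Pre_adv_eval6_triage_priority; infer_instance
def pvWitness_adv_eval6_triage_priority : List String := ["", "", "", "", "", "need tokens before cron"]

def Spec_adv_eval6_triage_priority (responses : List String) (out : Int) : Prop := out = adv_eval6_triage_priority_alt responses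
instance (responses : List String) (out : Int) : Decidable (Spec_adv_eval6_triage_priority responses out) := by unfold Spec_adv_eval6_triage_priority; infer_instance

-- ===== CLAIM (what is proved, stated in full; the proofs are below) =====
def Claim_equal_adv_eval6_triage_priority : Prop := ∀ (responses : List String), Dom_adv_eval6_triage_priority responses → Pre_adv_eval6_triage_priority responses → Spec_adv_eval6_triage_priority responses (adv_eval6_triage_priority responses)

-- ===== LEMMAS AND PROOFS =====

-- A's accumulator step, as a binary combine with identity -1
def pvComb (a b : Int) : Int := if b = -1 then a else if a = -1 then b else min a b

-- the min-find value A's loop computes for a phrase list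
def pvPM (cs : List Char) (ps : List String) : Int :=
  ps.foldr (fun p acc => pvComb (PySem.Chars.find cs p.toList) acc) (-1)

-- index shift when one character is dropped in front (-1 stays -1)
def pvShift (x : Int) : Int := if x = -1 then -1 else x + 1

theorem pvPM_cons (cs : List Char) (p : String) (ps : List String) :
    pvPM cs (p :: ps) = pvComb (PySem.Chars.find cs p.toList) (pvPM cs ps) := rfl

theorem pvComb_ge (a b : Int) (ha : -1 ≤ a) (hb : -1 ≤ b) : -1 ≤ pvComb a b := by
  unfold pvComb; simp only [min_def]; split_ifs <;> omega

theorem pvPM_ge (cs : List Char) (ps : List String) : -1 ≤ pvPM cs ps := by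
  induction ps with
  | nil => simp [pvPM]
  | cons p ps ih =>
    exact pvComb_ge _ _ (PySem.Chars.neg_one_le_find _ _) ih

theorem pvComb_assoc (a b c : Int) :
    pvComb (pvComb a b) c = pvComb a (pvComb b c) := by
  unfold pvComb; simp only [min_def]; split_ifs <;> omega

theorem pvComb_neg_one (b : Int) : pvComb (-1) b = b := by
  unfold pvComb; simp only [min_def]; split_ifs <;> omega

-- A's foldl over a phrase list equals pvComb with pvPM
theorem pv_foldl_comb (cs : List Char) (ps : List String) :
    ∀ acc : Int, -1 ≤ acc →
      ps.foldl (fun a p => pvComb a (PySem.Chars.find cs p.toList)) acc = pvComb acc (pvPM cs ps) := by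
  induction ps with
  | nil => intro acc _; simp [pvPM, pvComb]
  | cons p ps ih =>
    intro acc hacc
    have hf := PySem.Chars.neg_one_le_find cs p.toList
    rw [List.foldl_cons, ih _ (pvComb_ge _ _ hacc hf)]
    rw [pvPM_cons]
    exact pvComb_assoc _ _ _

-- find points at k when there is a prefix at k and none earlier
theorem pv_find_eq_of (s p : List Char) (k : ℕ)
    (h1 : p <+: s.drop k) (h2 : ∀ i < k, ¬ p <+: s.drop i) :
    PySem.Chars.find s p = (k : Int) := by
  have hin : PySem.Chars.isIn p s = true :=
    (PySem.Chars.exists_prefix_drop_iff_isIn p s).mp ⟨k, h1⟩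
  have hinf : p <:+: s := (PySem.Chars.isIn_iff_infix p s).mp hin
  have h0 : 0 ≤ PySem.Chars.find s p := (PySem.Chars.find_nonneg_iff s p).mpr hinf
  obtain ⟨hp, hmin⟩ := PySem.Chars.find_spec h0
  rcases lt_trichotomy (PySem.Chars.find s p).toNat k with h | h | h
  · exact absurd hp (h2 _ h)
  · omega
  · exact absurd h1 (hmin k h)

-- recursion for find along a cons
theorem pv_find_cons (c : Char) (cs p : List Char) :
    PySem.Chars.find (c :: cs) p =
      if PySem.Chars.startswith (c :: cs) p then 0 else pvShift (PySem.Chars.find cs p) := by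
  by_cases hs : PySem.Chars.startswith (c :: cs) p = true
  · rw [if_pos hs]
    have hpre : p <+: (c :: cs).drop 0 := by
      simpa using (PySem.Chars.startswith_iff (c :: cs) p).mp hs
    simpa using pv_find_eq_of (c :: cs) p 0 hpre (by omega)
  · rw [if_neg hs]
    have hns : ¬ p <+: (c :: cs) := fun h => hs ((PySem.Chars.startswith_iff (c :: cs) p).mpr h)
    by_cases hn : PySem.Chars.find cs p = -1
    · have hni : ¬ p <:+: cs := (PySem.Chars.find_eq_neg_one_iff cs p).mp hn
      have : PySem.Chars.find (c :: cs) p = -1 := by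
        apply (PySem.Chars.find_eq_neg_one_iff (c :: cs) p).mpr
        intro hinf
        have hin : PySem.Chars.isIn p (c :: cs) = true := (PySem.Chars.isIn_iff_infix p (c :: cs)).mpr hinf
        obtain ⟨j, hj⟩ := (PySem.Chars.exists_prefix_drop_iff_isIn p (c :: cs)).mpr hin
        cases j with
        | zero => exact hns (by simpa using hj)
        | succ j =>
          apply hni
          apply (PySem.Chars.isIn_iff_infix p cs).mp
          exact (PySem.Chars.exists_prefix_drop_iff_isIn p cs).mp ⟨j, by simpa using hj⟩
      rw [this, hn]; rfl
    · have h0 : 0 ≤ PySem.Chars.find cs p := by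
        have := PySem.Chars.neg_one_le_find cs p; omega
      obtain ⟨hp, hmin⟩ := PySem.Chars.find_spec h0
      set n := (PySem.Chars.find cs p).toNat with hndef
      have heq : PySem.Chars.find (c :: cs) p = ((n + 1 : ℕ) : Int) := by
        apply pv_find_eq_of
        · simpa using hp
        · intro i hi
          cases i with
          | zero => simpa using hns
          | succ i => simpa using hmin i (by omega)
      rw [heq]
      unfold pvShift
      rw [if_neg hn]
      omega

-- pvPM along a cons: 0 if some phrase starts here, else the shifted tail value
theorem pv_pm_cons (c : Char) (cs : List Char) (ps : List String) :
    pvPM (c :: cs) ps =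
      if ps.any (fun p => PySem.Chars.startswith (c :: cs) p.toList) then 0
      else pvShift (pvPM cs ps) := by
  induction ps with
  | nil => simp [pvPM, pvShift]
  | cons p ps ih =>
    have hrest := pvPM_ge (c :: cs) ps
    have htail := pvPM_ge cs ps
    have hf := PySem.Chars.neg_one_le_find cs p.toList
    rw [pvPM_cons, pv_find_cons, ih, pvPM_cons]
    by_cases hs : PySem.Chars.startswith (c :: cs) p.toList = true
    · rw [if_pos hs]
      have : (p :: ps).any (fun q => PySem.Chars.startswith (c :: cs) q.toList) = true := by
        simp [hs]
      rw [if_pos this]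
      by_cases ha : ps.any (fun q => PySem.Chars.startswith (c :: cs) q.toList) = true
      · rw [if_pos ha]; unfold pvComb; simp only [min_def]; split_ifs <;> (try contradiction) <;> omega
      · rw [if_neg ha]; unfold pvComb pvShift; simp only [min_def]; split_ifs <;> (try contradiction) <;> omega
    · rw [if_neg hs]
      by_cases ha : ps.any (fun q => PySem.Chars.startswith (c :: cs) q.toList) = true
      · rw [if_pos ha]
        have : (p :: ps).any (fun q => PySem.Chars.startswith (c :: cs) q.toList) = true := by
          simp [ha]
        rw [if_pos this]
        unfold pvComb pvShift; simp only [min_def]; split_ifs <;> (try contradiction) <;> omega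
      · rw [if_neg ha]
        have : ¬ (p :: ps).any (fun q => PySem.Chars.startswith (c :: cs) q.toList) = true := by
          simp [hs]; simpa using ha
        rw [if_neg this]
        unfold pvComb pvShift; simp only [min_def]; split_ifs <;> (try contradiction) <;> omega

-- B's scan computes A's decision from the two min-find values
theorem pv_scan_eq (cs : List Char) :
    pvScanGo cs =
      (if pvPM cs pvTokPhrases = -1 then 0
       else if pvPM cs pvCronPhrases = -1 then 1
       else if pvPM cs pvTokPhrases < pvPM cs pvCronPhrases then 1 else 0) := by
  induction cs with
  | nil =>
    have h1 : pvPM [] pvTokPhrases = -1 := by decide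
    have h2 : pvPM [] pvCronPhrases = -1 := by decide
    simp [pvScanGo, h1]
  | cons c cs ih =>
    have ht := pvPM_ge cs pvTokPhrases
    have hc := pvPM_ge cs pvCronPhrases
    rw [pvScanGo, pv_pm_cons, pv_pm_cons]
    by_cases hcr : pvCronPhrases.any (fun p => PySem.Chars.startswith (c :: cs) p.toList) = true
    · rw [if_pos hcr, if_pos hcr]
      by_cases htk : pvTokPhrases.any (fun p => PySem.Chars.startswith (c :: cs) p.toList) = true
      · rw [if_pos htk]; norm_num
      · rw [if_neg htk]; unfold pvShift; split_ifs <;> (try contradiction) <;> omega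
    · rw [if_neg hcr, if_neg hcr]
      by_cases htk : pvTokPhrases.any (fun p => PySem.Chars.startswith (c :: cs) p.toList) = true
      · rw [if_pos htk, if_pos htk]; unfold pvShift; split_ifs <;> (try contradiction) <;> omega
      · rw [if_neg htk, if_neg htk, ih]; unfold pvShift; split_ifs <;> (try contradiction) <;> omega

-- A's literal step function is pvComb applied to the char-level find
theorem pv_step_eq (r : String) :
    (fun (acc : Int) (phrase : String) =>
        let pos := PySem.Str.find r phrase
        if pos ≠ -1 then (if acc = -1 then pos else min acc pos) else acc) =
      fun acc phrase => pvComb acc (PySem.Chars.find r.toList phrase.toList) := by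
  funext a p
  simp only [PySem.Str.find_eq, pvComb, ite_not]

-- the whole decision, for an arbitrary (already lowered) string r
theorem pv_main (r : String) :
    (if pvTokPhrases.foldl
          (fun acc phrase =>
            let pos := PySem.Str.find r phrase
            if pos ≠ -1 then (if acc = -1 then pos else min acc pos) else acc) (-1) = -1 then (0 : Int)
     else if pvCronPhrases.foldl
          (fun acc phrase =>
            let pos := PySem.Str.find r phrase
            if pos ≠ -1 then (if acc = -1 then pos else min acc pos) else acc) (-1) = -1 then 1
     else if pvTokPhrases.foldl
          (fun acc phrase =>
            let pos := PySem.Str.find r phrase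
            if pos ≠ -1 then (if acc = -1 then pos else min acc pos) else acc) (-1) <
          pvCronPhrases.foldl
          (fun acc phrase =>
            let pos := PySem.Str.find r phrase
            if pos ≠ -1 then (if acc = -1 then pos else min acc pos) else acc) (-1) then 1 else 0) =
      pvScanGo r.toList := by
  rw [pv_step_eq,
      pv_foldl_comb r.toList pvTokPhrases (-1) (by omega),
      pv_foldl_comb r.toList pvCronPhrases (-1) (by omega),
      pvComb_neg_one, pvComb_neg_one, pv_scan_eq]

-- ===== VERDICT (by name: the statement is the Claim_ definition above) =====
theorem adv_eval6_triage_priority_spec : Claim_equal_adv_eval6_triage_priority := by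
  intro responses _ _
  unfold Spec_adv_eval6_triage_priority adv_eval6_triage_priority adv_eval6_triage_priority_alt
  rw [← PySem.Str.toList_lower]
  exact pv_main (PySem.Str.lower ((PySem.List.pyGet? responses 5).getD ""))
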